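-- pv_equiv track=rewrite | github.com/JaeYoung-Cho-95/CodingTest | Programmers/lv2/연속된 부분 수열의 합 re.py | make_idx
-- ===== SOURCE A (Python) =====
-- def make_idx(sequence, k):
--     for idx, value in enumerate(sequence):
--         if value == k:
--             return idx
--         elif value > k:
--             break
--
--     if value > k:
--         return idx - 1
--     else:
--         return idx
-- ===== SOURCE B (Python) =====
-- def make_idx(sequence, k):
--     # Staged characterization of A's result: the scan's stopping point is the
--     # first index holding a value > k (or the end), and the answer is the index
--     # of k inside the prefix before it, else stop - 1.
--     gt = [i for i, v in enumerate(sequence) if v > k]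
--     stop = gt[0] if gt else len(sequence)
--     head = sequence[:stop]
--     return head.index(k) if k in head else stop - 1
-- ===== Notes on version B (the rewrite author's own statement) =====
-- stated objective: alternative
-- what changed: Replaces A's fused loop with early return, break and leftover-variable post-processing by three staged library passes: build the list of indices with value > k, slice the prefix before the first such index, and answer with list.index of k in that prefix or stop - 1.
import Mathlib
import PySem

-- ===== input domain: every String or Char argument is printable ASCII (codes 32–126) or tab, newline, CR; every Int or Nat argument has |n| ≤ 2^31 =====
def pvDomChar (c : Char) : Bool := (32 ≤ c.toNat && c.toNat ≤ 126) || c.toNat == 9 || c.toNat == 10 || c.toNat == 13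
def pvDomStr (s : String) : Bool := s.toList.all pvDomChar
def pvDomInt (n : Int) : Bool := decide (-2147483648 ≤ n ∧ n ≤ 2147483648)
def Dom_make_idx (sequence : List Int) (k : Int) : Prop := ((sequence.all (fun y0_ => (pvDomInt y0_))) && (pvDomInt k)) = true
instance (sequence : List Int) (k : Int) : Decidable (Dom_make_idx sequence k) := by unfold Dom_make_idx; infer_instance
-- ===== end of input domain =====

-- B replaces A's fused loop (early return / break / leftover-variable post-processing) by
-- three staged passes: indices with value > k, the prefix before the first one, and
-- list.index of k in that prefix (objective: alternative, same O(n) cost).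

-- ===== PORT A =====
-- A's for-loop: early return (.inl r) on value == k, otherwise the loop ends (break on
-- value > k, or exhaustion) leaving the last-visited (idx, value) as .inr state.
def make_idx_loopA (k : Int) (idx : Int) (v : Int) (rest : List Int) : Int ⊕ (Int × Int) :=
  if v = k then .inl idx
  else if v > k then .inr (idx, v)       -- break
  else match rest with
    | [] => .inr (idx, v)                -- loop exhausted
    | w :: ws => make_idx_loopA k (idx + 1) w ws

def make_idx (sequence : List Int) (k : Int) : Int :=
  match sequence with
  | [] => 0   -- Python raises NameError here ('value' never bound); excluded by Pre_make_idx
  | v :: vs =>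
    match make_idx_loopA k 0 v vs with
    | .inl r => r
    | .inr (idx, value) => if value > k then idx - 1 else idx

-- ===== PORT B =====
-- Source B's three named stages, one helper per local variable.
def make_idx_gt (k : Int) (sequence : List Int) : List Int :=
  ((PySem.List.enumerate sequence).filter (fun p => decide (p.2 > k))).map (fun p => p.1)

def make_idx_stop (k : Int) (sequence : List Int) : Int :=
  match make_idx_gt k sequence with
  | [] => (sequence.length : Int)
  | i :: _ => i

def make_idx_head (k : Int) (sequence : List Int) : List Int :=
  PySem.List.slice sequence none (some (make_idx_stop k sequence))

def make_idx_alt (sequence : List Int) (k : Int) : Int :=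
  match PySem.List.index? (make_idx_head k sequence) k with
  | some j => (j : Int)
  | none => make_idx_stop k sequence - 1

-- ===== PRECONDITION & SPEC =====
-- Pre_ excludes only the empty list, on which Python A raises NameError ('value' is never bound).
def Pre_make_idx (sequence : List Int) (k : Int) : Prop := sequence ≠ []
instance (sequence : List Int) (k : Int) : Decidable (Pre_make_idx sequence k) := by unfold Pre_make_idx; infer_instance
def pvWitness_make_idx : List Int × Int := ([1, 3, 5], 4)

def Spec_make_idx (sequence : List Int) (k : Int) (out : Int) : Prop := out = make_idx_alt sequence k
instance (sequence : List Int) (k : Int) (out : Int) : Decidable (Spec_make_idx sequence k out) := by unfold Spec_make_idx; infer_instance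

-- ===== CLAIM =====
def Claim_equal_make_idx : Prop := ∀ (sequence : List Int) (k : Int), Dom_make_idx sequence k → Pre_make_idx sequence k → Spec_make_idx sequence k (make_idx sequence k)

-- ===== LEMMAS AND PROOFS =====

-- stop is a natural number ≤ length (either the length itself or an enumerate index)
theorem make_idx_stop_nat (k : Int) (xs : List Int) :
    ∃ n : Nat, make_idx_stop k xs = (n : Int) ∧ n ≤ xs.length := by
  unfold make_idx_stop
  cases hgt : make_idx_gt k xs with
  | nil => exact ⟨xs.length, rfl, le_rfl⟩
  | cons i rest =>
    have hi : i ∈ make_idx_gt k xs := by rw [hgt]; exact List.mem_cons_self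
    unfold make_idx_gt at hi
    rcases List.mem_map.1 hi with ⟨p, hp, hpi⟩
    rcases (PySem.List.mem_enumerate_iff _ _ _).1 (List.mem_of_mem_filter hp) with ⟨j, hj, hpj⟩
    refine ⟨j, ?_, le_of_lt hj⟩
    have hij : i = (j : Int) := by simp [hpj] at hpi; omega
    exact hij

-- shifting the start index of enumerate shifts the filtered index list
theorem make_idx_gt_shift (k : Int) : ∀ (xs : List Int) (s : Int),
    ((PySem.List.enumerate xs (s + 1)).filter (fun p => decide (p.2 > k))).map (fun p => p.1)
    = (((PySem.List.enumerate xs s).filter (fun p => decide (p.2 > k))).map (fun p => p.1)).map (· + 1) := by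
  intro xs
  induction xs with
  | nil => intro s; simp [PySem.List.enumerate_nil]
  | cons x xs ih =>
    intro s
    rw [PySem.List.enumerate_cons, PySem.List.enumerate_cons]
    by_cases hx : x > k
    · rw [List.filter_cons, List.filter_cons, if_pos (by simpa using hx), if_pos (by simpa using hx)]
      simp only [List.map_cons]
      rw [ih (s + 1)]
    · rw [List.filter_cons, List.filter_cons, if_neg (by simpa using hx), if_neg (by simpa using hx)]
      exact ih (s + 1)

theorem make_idx_gt_cons_le (k v : Int) (vs : List Int) (h : ¬ v > k) :
    make_idx_gt k (v :: vs) = (make_idx_gt k vs).map (· + 1) := by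
  unfold make_idx_gt
  rw [PySem.List.enumerate_cons]
  simp only [List.filter_cons, h, decide_false]
  exact make_idx_gt_shift k vs 0

theorem make_idx_stop_cons_le (k v : Int) (vs : List Int) (h : ¬ v > k) :
    make_idx_stop k (v :: vs) = make_idx_stop k vs + 1 := by
  unfold make_idx_stop
  rw [make_idx_gt_cons_le k v vs h]
  cases make_idx_gt k vs with
  | nil => simp
  | cons i rest => simp

theorem make_idx_head_cons_le (k v : Int) (vs : List Int) (h : ¬ v > k) :
    make_idx_head k (v :: vs) = v :: make_idx_head k vs := by
  unfold make_idx_head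
  rcases make_idx_stop_nat k vs with ⟨n, hn, -⟩
  rw [make_idx_stop_cons_le k v vs h, hn]
  have h1 : (n : Int) + 1 = ((n + 1 : Nat) : Int) := by push_cast; ring
  rw [h1, PySem.List.slice_to_natCast, PySem.List.slice_to_natCast]
  simp [List.take_succ_cons]

-- alt's value on a cons cell, by the three cases of A's branch
theorem make_idx_alt_cons_eq (k : Int) (vs : List Int) :
    make_idx_alt (k :: vs) k = 0 := by
  unfold make_idx_alt
  rw [make_idx_head_cons_le k k vs (by omega), PySem.List.index?_cons_self]
  simp

theorem make_idx_alt_cons_gt (k v : Int) (vs : List Int) (h : v > k) :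
    make_idx_alt (v :: vs) k = -1 := by
  have hstop : make_idx_stop k (v :: vs) = 0 := by
    unfold make_idx_stop make_idx_gt
    rw [PySem.List.enumerate_cons]
    simp [h]
  unfold make_idx_alt
  rw [make_idx_head]
  rw [hstop]
  have : PySem.List.slice (v :: vs) none (some ((0 : Nat) : Int)) = (v :: vs).take 0 :=
    PySem.List.slice_to_natCast (v :: vs) 0
  simp only [Nat.cast_zero] at this
  rw [this]
  simp [PySem.List.index?_eq_idxOf?]

theorem make_idx_alt_cons_lt (k v : Int) (vs : List Int) (h : v < k) :
    make_idx_alt (v :: vs) k = 1 + make_idx_alt vs k := by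
  have hne : v ≠ k := by omega
  have hle : ¬ v > k := by omega
  unfold make_idx_alt
  rw [make_idx_head_cons_le k v vs hle, PySem.List.index?_cons_of_ne (make_idx_head k vs) hne,
      make_idx_stop_cons_le k v vs hle]
  cases PySem.List.index? (make_idx_head k vs) k with
  | none => simp only [Option.map_none]; ring
  | some j => simp only [Option.map_some]; push_cast; ring

-- A's loop with post-processing, started at offset idx, equals idx + B on the remaining list
theorem make_idx_loop_eq (k : Int) : ∀ (rest : List Int) (idx v : Int),
    (match make_idx_loopA k idx v rest with
     | .inl r => r
     | .inr (i, value) => if value > k then i - 1 else i)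
    = idx + make_idx_alt (v :: rest) k := by
  intro rest
  induction rest with
  | nil =>
    intro idx v
    rcases lt_trichotomy v k with hv | hv | hv
    · rw [make_idx_alt_cons_lt k v [] hv]
      have h0 : make_idx_alt [] k = -1 := by
        unfold make_idx_alt make_idx_head make_idx_stop make_idx_gt
        simp [PySem.List.enumerate_nil, PySem.List.slice, PySem.List.index?_eq_idxOf?]
      rw [h0]
      have hne : ¬ v = k := by omega
      have hgt : ¬ v > k := by omega
      simp [make_idx_loopA, hne, hgt]
    · rw [hv, make_idx_alt_cons_eq k []]
      simp [make_idx_loopA]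
    · rw [make_idx_alt_cons_gt k v [] hv]
      have hne : ¬ v = k := by omega
      simp [make_idx_loopA, hne, hv]
      ring
  | cons w ws ih =>
    intro idx v
    rcases lt_trichotomy v k with hv | hv | hv
    · have hne : ¬ v = k := by omega
      have hgt : ¬ v > k := by omega
      rw [make_idx_alt_cons_lt k v (w :: ws) hv]
      have hloop : make_idx_loopA k idx v (w :: ws) = make_idx_loopA k (idx + 1) w ws := by
        rw [make_idx_loopA]; simp [hne, hgt]
      rw [hloop, ih (idx + 1) w]
      ring
    · rw [hv, make_idx_alt_cons_eq k (w :: ws)]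
      simp [make_idx_loopA]
    · rw [make_idx_alt_cons_gt k v (w :: ws) hv]
      have hne : ¬ v = k := by omega
      simp [make_idx_loopA, hne, hv]
      ring

-- ===== VERDICT =====
theorem make_idx_spec : Claim_equal_make_idx := by
  intro sequence k _ hpre
  unfold Spec_make_idx
  match sequence with
  | [] => exact absurd rfl hpre
  | v :: vs =>
    show (match make_idx_loopA k 0 v vs with
          | .inl r => r
          | .inr (idx, value) => if value > k then idx - 1 else idx) = make_idx_alt (v :: vs) k
    rw [make_idx_loop_eq k vs 0 v]
    ring
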